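-- pv_equiv track=rewrite | github.com/owenps/KattisSolutions | pebble_solitaire_2.py | findmoves
-- ===== SOURCE A (Python) =====
-- def findmoves(game):
--     res = []
--     offset = -1
--     while True:
--         offset = game.find("-oo",offset+1)
--         if offset == -1:
--             break
--         res.append((offset,"o--"))
--     offset = -1
--     while True:
--         offset = game.find("oo-",offset+1)
--         if offset == -1:
--             break
--         res.append((offset,"--o"))
--     return res
-- ===== SOURCE B (Python) =====
-- def findmoves(game):
--     first = []
--     second = []
--     for i in range(len(game) - 2):
--         t = game[i:i+3]
--         if t == "-oo":
--             first.append((i, "o--"))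
--         elif t == "oo-":
--             second.append((i, "--o"))
--     return first + second
-- ===== Notes on version B (the rewrite author's own statement) =====
-- stated objective: simpler
-- what changed: Replaced A's two repeated str.find scans (restarting a search after each hit) by one single index pass over all window positions, classifying each length-3 window into one of two buckets that are concatenated at the end.
import Mathlib
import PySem

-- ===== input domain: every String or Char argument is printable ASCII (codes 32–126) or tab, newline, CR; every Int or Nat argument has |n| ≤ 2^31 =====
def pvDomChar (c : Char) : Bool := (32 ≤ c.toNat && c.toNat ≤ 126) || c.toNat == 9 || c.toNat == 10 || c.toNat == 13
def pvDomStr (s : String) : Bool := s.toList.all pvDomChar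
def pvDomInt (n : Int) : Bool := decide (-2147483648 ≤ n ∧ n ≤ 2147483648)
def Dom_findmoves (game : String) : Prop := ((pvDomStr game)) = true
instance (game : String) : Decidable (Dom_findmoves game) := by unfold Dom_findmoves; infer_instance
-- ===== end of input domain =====

-- B merges A's two repeated-find scans into one single index pass with two buckets; objective: simpler.

-- ===== PORT A =====
-- A's 'while True: offset = game.find(pat, offset+1); …' loop; the fuel (length+1) only makes the
-- same iteration total — each found index strictly increases, so the fuel is never exhausted.
def pvLoopA (cs pat : List Char) (tag : String) (fuel : Nat) (offset : Int) : List (Int × String) :=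
  match fuel with
  | 0 => []
  | fuel + 1 =>
    let o := PySem.Chars.findFrom cs pat (offset + 1) none
    if o = -1 then [] else (o, tag) :: pvLoopA cs pat tag fuel o

def findmoves (game : String) : List (Int × String) :=
  pvLoopA game.toList ['-', 'o', 'o'] "o--" (game.toList.length + 1) (-1)
    ++ pvLoopA game.toList ['o', 'o', '-'] "--o" (game.toList.length + 1) (-1)

-- ===== PORT B =====
-- one step of B's 'for i in range(len(game)-2)' loop; state = (first, second) buckets
def pvStepB (cs : List Char) (st : List (Int × String) × List (Int × String)) (i : Int) :
    List (Int × String) × List (Int × String) :=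
  let t := PySem.List.slice cs (some i) (some (i + 3))
  if t = ['-', 'o', 'o'] then (st.1 ++ [(i, "o--")], st.2)
  else if t = ['o', 'o', '-'] then (st.1, st.2 ++ [(i, "--o")])
  else st

def findmoves_alt (game : String) : List (Int × String) :=
  let cs := game.toList
  let st := (PySem.List.pyRange 0 ((cs.length : Int) - 2) 1).foldl (pvStepB cs) ([], [])
  st.1 ++ st.2

-- ===== PRECONDITION & SPEC =====
def Spec_findmoves (game : String) (out : List (Int × String)) : Prop := out = findmoves_alt game
instance (game : String) (out : List (Int × String)) : Decidable (Spec_findmoves game out) := by unfold Spec_findmoves; infer_instance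

-- ===== CLAIM (what is proved, stated in full; the proofs are below) =====
def Claim_equal_findmoves : Prop := ∀ (game : String), Dom_findmoves game → Spec_findmoves game (findmoves game)

-- ===== LEMMAS AND PROOFS =====

-- canonical description of both sides: occurrence indices drawn from an index list
def pvOccs (cs pat : List Char) (tag : String) (l : List Nat) : List (Int × String) :=
  l.filterMap (fun i => if pat <+: cs.drop i then some ((i : Int), tag) else none)

lemma pvOccs_eq_nil (cs pat : List Char) (tag : String) (l : List Nat)
    (h : ∀ i ∈ l, (cs.drop i).length < pat.length) : pvOccs cs pat tag l = [] := by
  rw [pvOccs, List.filterMap_eq_nil_iff]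
  intro i hi
  rw [if_neg]
  intro hp
  exact absurd hp.length_le (by have := h i hi; omega)

lemma pvLoopA_eq (cs pat : List Char) (tag : String) (hpat : pat ≠ []) :
    ∀ (fuel k : Nat), k ≤ cs.length → cs.length - k < fuel →
      pvLoopA cs pat tag fuel ((k : Int) - 1) = pvOccs cs pat tag (List.range' k (cs.length - k)) := by
  intro fuel
  induction fuel with
  | zero => intro k hk hf; omega
  | succ fuel ih =>
    intro k hk hf
    have hco : (k : Int) - 1 + 1 = (k : Nat) := by ring
    rw [pvLoopA, hco, PySem.Chars.findFrom_natCast cs pat k hk]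
    by_cases hfind : PySem.Chars.find (cs.drop k) pat = -1
    · have hninf : ¬ pat <:+: cs.drop k := (PySem.Chars.find_eq_neg_one_iff _ _).mp hfind
      have hemp : pvOccs cs pat tag (List.range' k (cs.length - k)) = [] := by
        rw [pvOccs, List.filterMap_eq_nil_iff]
        intro i hi
        rw [List.mem_range'_1] at hi
        rw [if_neg]
        intro hpre
        apply hninf
        have hd : cs.drop i = List.drop (i - k) (cs.drop k) := by
          rw [List.drop_drop]; congr 1; omega
        exact (hd ▸ hpre).isInfix.trans (List.drop_suffix _ _).isInfix
      rw [hemp, if_pos hfind]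
      simp
    · have hge : 0 ≤ PySem.Chars.find (cs.drop k) pat := by
        have := PySem.Chars.neg_one_le_find (cs.drop k) pat; omega
      rw [if_neg hfind]
      obtain ⟨hpre, hmin⟩ := PySem.Chars.find_spec hge
      set m := (PySem.Chars.find (cs.drop k) pat).toNat with hm
      have hmi : PySem.Chars.find (cs.drop k) pat = (m : Int) := by omega
      have hdd : List.drop m (cs.drop k) = cs.drop (k + m) := by
        rw [List.drop_drop, Nat.add_comm]
      rw [hdd] at hpre
      have hlt : k + m < cs.length := by
        have h1 : pat.length ≤ (cs.drop (k + m)).length := hpre.length_le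
        have h2 : 0 < pat.length := List.length_pos_of_ne_nil hpat
        simp [List.length_drop] at h1
        omega
      rw [if_neg (by omega)]
      have hsplit : List.range' k (cs.length - k) =
          List.range' k m ++ (k + m) :: List.range' (k + m + 1) (cs.length - (k + m + 1)) := by
        have h1 : List.range' k m ++ List.range' (k + m) (cs.length - k - m) = List.range' k (cs.length - k) := by
          have := List.range'_append (s := k) (m := m) (n := cs.length - k - m) (step := 1)
          rw [show m + (cs.length - k - m) = cs.length - k by omega] at this
          simpa using this
        rw [← h1]
        congr 1
        have : cs.length - k - m = (cs.length - (k + m + 1)) + 1 := by omega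
        rw [this, List.range'_succ]
      rw [hsplit, pvOccs, List.filterMap_append, List.filterMap_cons]
      have hnone : List.filterMap (fun i => if pat <+: cs.drop i then some ((i : Int), tag) else none)
          (List.range' k m) = [] := by
        rw [List.filterMap_eq_nil_iff]
        intro i hi
        rw [List.mem_range'_1] at hi
        rw [if_neg]
        intro hp
        refine hmin (i - k) (by omega) ?_
        have hd : List.drop (i - k) (cs.drop k) = cs.drop i := by
          rw [List.drop_drop]; congr 1; omega
        rw [hd]; exact hp
      rw [hnone, if_pos hpre]
      have htail := ih (k + m + 1) (by omega) (by omega)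
      have hco2 : ((k : Int) + PySem.Chars.find (cs.drop k) pat) = ((k + m + 1 : Nat) : Int) - 1 := by
        rw [hmi]; push_cast; ring
      rw [hco2, htail]
      simp [pvOccs]

lemma pvFoldB_eq (cs : List Char) :
    ∀ (l : List Int) (a b : List (Int × String)),
      l.foldl (pvStepB cs) (a, b) =
        (a ++ l.filterMap (fun i => if PySem.List.slice cs (some i) (some (i + 3)) = ['-', 'o', 'o'] then some (i, "o--") else none),
         b ++ l.filterMap (fun i => if PySem.List.slice cs (some i) (some (i + 3)) = ['o', 'o', '-'] then some (i, "--o") else none)) := by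
  intro l
  induction l with
  | nil => intro a b; simp
  | cons i l ih =>
    intro a b
    simp only [List.foldl_cons, List.filterMap_cons, pvStepB]
    by_cases h1 : PySem.List.slice cs (some i) (some (i + 3)) = ['-', 'o', 'o']
    · have h2 : ¬ PySem.List.slice cs (some i) (some (i + 3)) = ['o', 'o', '-'] := by
        rw [h1]; decide
      simp [h1, ih]
    · by_cases h2 : PySem.List.slice cs (some i) (some (i + 3)) = ['o', 'o', '-']
      · simp [h2, ih]
      · simp [h1, h2, ih]

-- one of A's scans equals the corresponding bucket that B's pass collects
lemma pvSide (cs pat : List Char) (tag : String) (h3 : pat.length = 3) :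
    pvLoopA cs pat tag (cs.length + 1) (-1) =
      (PySem.List.pyRange 0 ((cs.length : Int) - 2) 1).filterMap
        (fun i => if PySem.List.slice cs (some i) (some (i + 3)) = pat then some (i, tag) else none) := by
  have hpat : pat ≠ [] := by intro h; rw [h] at h3; simp at h3
  have hA := pvLoopA_eq cs pat tag hpat (cs.length + 1) 0 (Nat.zero_le _) (by omega)
  norm_num at hA
  rw [hA, ← List.range_eq_range']
  have hfun : ∀ k : Nat,
      (if PySem.List.slice cs (some (k : Int)) (some ((k : Int) + 3)) = pat then some ((k : Int), tag) else none)
        = (if pat <+: cs.drop k then some ((k : Int), tag) else none) := by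
    intro k
    have hs : PySem.List.slice cs (some (k : Int)) (some ((k : Int) + 3)) = List.take 3 (cs.drop k) := by
      have h := PySem.List.slice_natCast_add cs k 3
      simp at h
      exact h
    rw [hs]
    by_cases hp : pat <+: cs.drop k
    · rw [if_pos hp, if_pos]
      have := List.prefix_iff_eq_take.mp hp
      rw [h3] at this
      exact this.symm
    · rw [if_neg hp, if_neg]
      intro he
      exact hp (List.prefix_iff_eq_take.mpr (by rw [h3, he]))
  by_cases h2 : 2 ≤ cs.length
  · have hcast : ((cs.length : Int) - 2) = ((cs.length - 2 : Nat) : Int) := by push_cast [h2]; ring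
    rw [hcast, PySem.List.pyRange_zero_natCast, List.filterMap_map]
    have hsp : List.range cs.length = List.range (cs.length - 2) ++ List.range' (cs.length - 2) 2 := by
      rw [List.range_eq_range', List.range_eq_range']
      have h := List.range'_append (s := 0) (m := cs.length - 2) (n := 2) (step := 1)
      simp only [Nat.one_mul, Nat.zero_add] at h
      rw [h, show cs.length - 2 + 2 = cs.length by omega]
    have hjunk : pvOccs cs pat tag (List.range' (cs.length - 2) 2) = [] := by
      apply pvOccs_eq_nil
      intro i hi
      rw [List.mem_range'_1] at hi
      simp [List.length_drop, h3]
      omega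
    rw [hsp]
    rw [show pvOccs cs pat tag (List.range (cs.length - 2) ++ List.range' (cs.length - 2) 2)
        = pvOccs cs pat tag (List.range (cs.length - 2)) ++ pvOccs cs pat tag (List.range' (cs.length - 2) 2) by
      simp [pvOccs]]
    rw [hjunk, List.append_nil, pvOccs]
    congr 1
    funext k
    simp only [Function.comp]
    exact (hfun k).symm
  · have hz : PySem.List.pyRange 0 ((cs.length : Int) - 2) 1 = [] := by
      unfold PySem.List.pyRange
      simp
      omega
    rw [hz, List.filterMap_nil]
    apply pvOccs_eq_nil
    intro i hi
    rw [List.mem_range] at hi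
    simp [List.length_drop, h3]
    omega

-- ===== VERDICT (by name: the statement is the Claim_ definition above) =====
theorem findmoves_spec : Claim_equal_findmoves := by
  intro game _
  unfold Spec_findmoves findmoves findmoves_alt
  dsimp only
  rw [pvFoldB_eq]
  simp only [List.nil_append]
  rw [pvSide game.toList ['-', 'o', 'o'] "o--" (by decide),
      pvSide game.toList ['o', 'o', '-'] "--o" (by decide)]
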